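-- pv_equiv track=rewrite | github.com/openTdataCH/data_tests | daily_report_mail.py | augment_html_rendering
-- ===== SOURCE A (Python) =====
-- def augment_html_rendering(payload: str) -> str:
--     payload.replace("\\n", "\n")
--     payload = payload.replace("\n", "<br>\n")
--     for token in ("warning", "failure", "error", "exception"):  # lowercase only
--         for t in (token, token.upper(), token[0].upper() + token[1:]):
--             payload = payload.replace(t, f'<span style="font-weight: bold; color: red;">{t}</span>')
--     payload = payload.replace("\r", "<br>")
--     return payload
-- ===== SOURCE B (Python) =====
-- TOKENS = [v for tok in ("warning", "failure", "error", "exception")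
--             for v in (tok, tok.upper(), tok.capitalize())]
--
-- SPAN = '<span style="font-weight: bold; color: red;">{}</span>'
--
--
-- def augment_html_rendering(payload: str) -> str:
--     # One left-to-right scan: newlines, carriage returns and the 12 exact
--     # token variants are handled at the position where they occur, instead
--     # of A's fourteen full-string replace passes.
--     out = []
--     i = 0
--     n = len(payload)
--     while i < n:
--         c = payload[i]
--         if c == "\n":
--             out.append("<br>\n")
--             i += 1
--         elif c == "\r":
--             out.append("<br>")
--             i += 1
--         else:
--             for t in TOKENS:
--                 if payload.startswith(t, i):
--                     out.append(SPAN.format(t))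
--                     i += len(t)
--                     break
--             else:
--                 out.append(c)
--                 i += 1
--     return "".join(out)
-- ===== Notes on version B (the rewrite author's own statement) =====
-- stated objective: alternative
-- what changed: A makes fourteen sequential full-string replace passes (newline, twelve token case-variants, carriage return); B makes a single left-to-right scan that handles \n, \r and the first matching token variant at each position.
import Mathlib
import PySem

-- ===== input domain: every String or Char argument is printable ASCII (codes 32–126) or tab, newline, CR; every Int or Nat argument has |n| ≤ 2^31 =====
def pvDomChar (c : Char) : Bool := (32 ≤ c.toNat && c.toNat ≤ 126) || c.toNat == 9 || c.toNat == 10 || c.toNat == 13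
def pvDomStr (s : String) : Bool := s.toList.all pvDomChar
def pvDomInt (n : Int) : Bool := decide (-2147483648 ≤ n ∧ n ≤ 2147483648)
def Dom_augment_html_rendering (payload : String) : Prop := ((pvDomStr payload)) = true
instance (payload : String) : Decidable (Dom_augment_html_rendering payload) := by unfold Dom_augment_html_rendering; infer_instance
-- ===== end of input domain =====

set_option maxRecDepth 30000
set_option maxHeartbeats 1000000


-- B replaces A's fourteen sequential full-string replace passes by a single
-- left-to-right scan handling '\n', '\r' and the twelve token variants in place.

-- ===== PORT A =====

def pvSpanStr (t : String) : String :=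
  "<span style=\"font-weight: bold; color: red;\">" ++ t ++ "</span>"

-- token[0].upper() + token[1:]; token[0] via PySem.Str.pyGet? (the IndexError
-- `none` branch is unreachable: A applies this to nonempty literal tokens only)
def pvCapitalizeA (token : String) : String :=
  match PySem.Str.pyGet? token 0 with
  | some c => String.ofList [PySem.Chars.upperChar c] ++ PySem.Str.slice token (some 1) none
  | none => ""

def augment_html_rendering (payload : String) : String :=
  let _ := PySem.Str.replace payload "\\n" "\n"   -- A's dead first statement (result discarded)
  let p1 := PySem.Str.replace payload "\n" "<br>\n"
  let p2 := (["warning", "failure", "error", "exception"]).foldl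
      (fun p token =>
        ([token, PySem.Str.upper token, pvCapitalizeA token]).foldl
          (fun q t => PySem.Str.replace q t (pvSpanStr t)) p) p1
  PySem.Str.replace p2 "\r" "<br>"

-- ===== PORT B =====

-- str.capitalize(): first char uppercased, the rest lowercased (exact on ASCII)
def pvCapitalizeB (t : String) : String :=
  String.ofList (match t.toList with
    | [] => []
    | c :: rest => PySem.Chars.upperChar c :: PySem.Chars.lower rest)

def pvTokensB : List String :=
  (["warning", "failure", "error", "exception"]).flatMap
    (fun tok => [tok, PySem.Str.upper tok, pvCapitalizeB tok])

-- Source B's while loop over index i, ported with fuel = number of remaining chars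
-- (each iteration consumes at least one character, so fuel never runs out)
def pvScanGo (ts : List (List Char)) : Nat → List Char → List Char
  | 0, _ => []
  | _ + 1, [] => []
  | fuel + 1, c :: rest =>
    if c = '\n' then "<br>\n".toList ++ pvScanGo ts fuel rest
    else if c = '\r' then "<br>".toList ++ pvScanGo ts fuel rest
    else
      match ts.find? (fun t => t.isPrefixOf (c :: rest)) with
      | some t =>
          ("<span style=\"font-weight: bold; color: red;\">".toList ++ t ++ "</span>".toList)
            ++ pvScanGo ts fuel ((c :: rest).drop t.length)
      | none => c :: pvScanGo ts fuel rest

def augment_html_rendering_alt (payload : String) : String :=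
  String.ofList (pvScanGo (pvTokensB.map String.toList) payload.toList.length payload.toList)

-- ===== PRECONDITION & SPEC =====
def Spec_augment_html_rendering (payload : String) (out : String) : Prop := out = augment_html_rendering_alt payload
instance (payload : String) (out : String) : Decidable (Spec_augment_html_rendering payload out) := by unfold Spec_augment_html_rendering; infer_instance

-- ===== CLAIM (what is proved, stated in full; the proofs are below) =====
def Claim_equal_augment_html_rendering : Prop := ∀ (payload : String), Dom_augment_html_rendering payload → Spec_augment_html_rendering payload (augment_html_rendering payload)

-- ===== LEMMAS AND PROOFS =====

-- List-level mirror of PySem.Chars.replace.go, accumulator-free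
def pvRep (old new : List Char) : Nat → List Char → List Char
  | 0, l => l
  | _ + 1, [] => []
  | fuel + 1, c :: t =>
    if old.isPrefixOf (c :: t) then new ++ pvRep old new fuel ((c :: t).drop old.length)
    else c :: pvRep old new fuel t

def pvRepC (old new l : List Char) : List Char := pvRep old new l.length l

def pvVL : List (List Char) :=
  ["warning".toList, "WARNING".toList, "Warning".toList,
   "failure".toList, "FAILURE".toList, "Failure".toList,
   "error".toList, "ERROR".toList, "Error".toList,
   "exception".toList, "EXCEPTION".toList, "Exception".toList]

def pvSpanL (t : List Char) : List Char :=
  "<span style=\"font-weight: bold; color: red;\">".toList ++ t ++ "</span>".toList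
def pvBrn : List Char := "<br>\n".toList
def pvBr : List Char := "<br>".toList
def pvPats : List (List Char) := ['\n'] :: ['\r'] :: pvVL

def pvFold (ts : List (List Char)) (s : List Char) : List Char :=
  ts.foldl (fun p t => pvRepC t (pvSpanL t) p) s
def pvChainL (s : List Char) : List Char :=
  pvRepC ['\r'] pvBr (pvFold pvVL (pvRepC ['\n'] pvBrn s))
def pvScanL (s : List Char) : List Char := pvScanGo pvVL s.length s

-- concrete combinatorial facts about the twelve variants and their spans
theorem pvF1 : ∀ u ∈ pvVL, u ≠ [] := by decide
theorem pvF2 : ∀ u ∈ pvVL, '<' ∉ u ∧ '>' ∉ u ∧ '\n' ∉ u ∧ '\r' ∉ u := by decide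
theorem pvF3 : ∀ u ∈ pvVL, ∀ c ∈ pvBrn, ¬ [c] <+: u := by
  have h : (pvVL.all fun u => pvBrn.all fun c => !([c].isPrefixOf u)) = true := by decide
  simp only [List.all_eq_true, Bool.not_eq_true'] at h
  intro u hu c hc hpre
  have hb := h u hu c hc
  rw [(List.isPrefixOf_iff_prefix).mpr hpre] at hb
  simp at hb
theorem pvF4 : ∀ u ∈ pvVL, ∀ v ∈ pvVL, u ≠ v → ∀ j ≤ v.length, ¬ u <+: v.drop j := by decide
theorem pvF5 : pvVL.Pairwise (fun uE uL => ∀ j, 1 ≤ j → j < uL.length → ¬ uL.drop j <+: uE) := by decide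
theorem pvF6 : pvVL.Nodup := by decide
theorem pvF7 : ∀ u ∈ pvVL, ∀ v ∈ pvVL, u ≠ v → ∀ j ≤ (pvSpanL v).length, ¬ u <+: (pvSpanL v).drop j := by decide
theorem pvF8 : ∀ v ∈ pvVL, ∀ j < (pvSpanL v).length, '>' ∈ (pvSpanL v).drop j := by decide
theorem pvF9 : ∀ v ∈ pvVL, '\r' ∉ pvSpanL v := by decide
theorem pvF10 : '\r' ∉ pvBrn := by decide


theorem pvGo_eq (old new : List Char) :
    ∀ (fuel : Nat) (l acc : List Char),
      PySem.Chars.replace.go old new fuel l acc = acc.reverse ++ pvRep old new fuel l := by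
  intro fuel
  induction fuel with
  | zero =>
    intro l acc
    rw [PySem.Chars.replace.go.eq_def]
    rfl
  | succ f ih =>
    intro l acc
    cases l with
    | nil =>
      rw [PySem.Chars.replace.go.eq_def]
      simp [pvRep]
    | cons c t =>
      rw [PySem.Chars.replace.go.eq_def]
      by_cases h : old.isPrefixOf (c :: t)
      · simp only [h, if_true, pvRep, ih]
        simp
      · simp only [h, if_false, pvRep, ih, Bool.false_eq_true]
        simp

theorem pvReplace_eq (s old new : List Char) (h : old ≠ []) :
    PySem.Chars.replace s old new = pvRepC old new s := by
  have hne : old.isEmpty = false := by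
    cases old with
    | nil => exact absurd rfl h
    | cons a b => rfl
  unfold PySem.Chars.replace
  rw [hne]
  simp only [Bool.false_eq_true, if_false]
  rw [pvGo_eq]
  rfl

theorem pvRep_fuel (old new : List Char) (h : old ≠ []) :
    ∀ (fuel : Nat) (l : List Char), l.length ≤ fuel → pvRep old new fuel l = pvRepC old new l := by
  intro fuel
  induction fuel using Nat.strong_induction_on with
  | _ fuel ih =>
    intro l hl
    cases l with
    | nil => cases fuel <;> rfl
    | cons c t =>
      cases fuel with
      | zero => simp at hl
      | succ f =>
        have hol : 1 ≤ old.length := by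
          cases old with
          | nil => exact absurd rfl h
          | cons a b => simp
        have hr : t.length ≤ f := by simpa using Nat.succ_le_succ_iff.mp hl
        have hd : ((c :: t).drop old.length).length ≤ t.length := by
          simp only [List.length_drop, List.length_cons]
          omega
        have h2 : ∀ m, pvRep old new (m + 1) (c :: t)
            = if old.isPrefixOf (c :: t) then new ++ pvRep old new m ((c :: t).drop old.length)
              else c :: pvRep old new m t := fun m => rfl
        show pvRep old new (f + 1) (c :: t) = pvRep old new (t.length + 1) (c :: t)
        by_cases hm : old.isPrefixOf (c :: t)
        · rw [h2 f, h2 t.length, if_pos hm, if_pos hm,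
              ih f (by omega) _ (le_trans hd hr),
              ih t.length (by omega) _ hd]
        · rw [h2 f, h2 t.length, if_neg hm, if_neg hm,
              ih f (by omega) _ hr,
              ih t.length (by omega) _ (le_refl _)]

theorem pvRepC_cons_match (old new : List Char) (c : Char) (t : List Char) (h : old ≠ [])
    (hm : old <+: (c :: t)) :
    pvRepC old new (c :: t) = new ++ pvRepC old new ((c :: t).drop old.length) := by
  have hb : old.isPrefixOf (c :: t) = true := List.isPrefixOf_iff_prefix.mpr hm
  have hol : 1 ≤ old.length := by
    cases old with
    | nil => exact absurd rfl h
    | cons a b => simp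
  show pvRep old new (c :: t).length (c :: t) = _
  have h2 : pvRep old new (c :: t).length (c :: t)
      = if old.isPrefixOf (c :: t) then new ++ pvRep old new t.length ((c :: t).drop old.length)
        else c :: pvRep old new t.length t := rfl
  rw [h2, if_pos hb]
  have hd : ((c :: t).drop old.length).length ≤ t.length := by
    simp only [List.length_drop, List.length_cons]
    omega
  rw [pvRep_fuel old new h _ _ hd]

theorem pvRepC_cons_nomatch (old new : List Char) (c : Char) (t : List Char)
    (hm : ¬ old <+: (c :: t)) :
    pvRepC old new (c :: t) = c :: pvRepC old new t := by
  have hb : old.isPrefixOf (c :: t) = false := by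
    rw [← Bool.not_eq_true, List.isPrefixOf_iff_prefix]
    exact hm
  show pvRep old new (c :: t).length (c :: t) = _
  have h2 : pvRep old new (c :: t).length (c :: t)
      = if old.isPrefixOf (c :: t) then new ++ pvRep old new t.length ((c :: t).drop old.length)
        else c :: pvRep old new t.length t := rfl
  rw [h2, if_neg (by simp [hb])]
  rfl

theorem pvRepC_append (old new a x : List Char) (_h : old ≠ [])
    (hj : ∀ j < a.length, ¬ old <+: (a.drop j ++ x)) :
    pvRepC old new (a ++ x) = a ++ pvRepC old new x := by
  induction a with
  | nil => simp
  | cons c a' ih =>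
    have h0 : ¬ old <+: ((c :: a') ++ x) := by
      have := hj 0 (by simp)
      simpa using this
    rw [List.cons_append, pvRepC_cons_nomatch old new c (a' ++ x) (by simpa using h0)]
    rw [ih (fun j hjl => by simpa using hj (j + 1) (by simpa using Nat.succ_lt_succ hjl))]
    rfl

theorem pvRepC_head (old new x : List Char) (h : old ≠ []) :
    pvRepC old new (old ++ x) = new ++ pvRepC old new x := by
  cases old with
  | nil => exact absurd rfl h
  | cons o ot =>
    rw [List.cons_append, pvRepC_cons_match (o :: ot) new o (ot ++ x) h
        (by rw [← List.cons_append]; exact List.prefix_append _ _)]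
    congr 1
    rw [← List.cons_append, List.drop_left]

theorem pvRepC_id (old new l : List Char) (h : old ≠ [])
    (hj : ∀ j < l.length, ¬ old <+: l.drop j) : pvRepC old new l = l := by
  have h0 : pvRepC old new [] = [] := rfl
  have h1 := pvRepC_append old new l [] h (by simpa using hj)
  rw [List.append_nil] at h1
  rw [h1, h0, List.append_nil]

theorem pvPfx_cases {α : Type} (u a x : List α) (h : u <+: a ++ x) :
    u <+: a ∨ (a <+: u ∧ u.drop a.length <+: x) := by
  induction a generalizing u with
  | nil =>
    right
    exact ⟨List.nil_prefix, by simpa using h⟩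
  | cons b a' ih =>
    cases u with
    | nil => left; exact List.nil_prefix
    | cons v u' =>
      rw [List.cons_append, List.cons_prefix_cons] at h
      obtain ⟨rfl, h2⟩ := h
      rcases ih u' h2 with h3 | ⟨h3, h4⟩
      · left
        exact List.cons_prefix_cons.mpr ⟨rfl, h3⟩
      · right
        refine ⟨List.cons_prefix_cons.mpr ⟨rfl, h3⟩, ?_⟩
        simpa using h4

theorem pvPrefix_head? {α : Type} {u z : List α} (h : u <+: z) (hu : u ≠ []) :
    z.head? = u.head? := by
  cases u with
  | nil => exact absurd rfl hu
  | cons v u' =>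
    obtain ⟨t, rfl⟩ := h
    rfl

theorem pvSingle_pre {c : Char} {z : List Char} : [c] <+: z ↔ z.head? = some c := by
  constructor
  · intro h
    obtain ⟨t, rfl⟩ := h
    rfl
  · intro h
    cases z with
    | nil => simp at h
    | cons d t =>
      simp only [List.head?_cons, Option.some.injEq] at h
      subst h
      exact ⟨t, rfl⟩

theorem pvFold_skip (ts : List (List Char)) (a x : List Char)
    (h : ∀ u ∈ ts, u ≠ [] ∧ ∀ j < a.length, ∀ y : List Char, ¬ u <+: (a.drop j ++ y)) :
    pvFold ts (a ++ x) = a ++ pvFold ts x := by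
  induction ts generalizing x with
  | nil => rfl
  | cons u ts' ih =>
    have hu := h u (by simp)
    show pvFold ts' (pvRepC u (pvSpanL u) (a ++ x)) = _
    rw [pvRepC_append u (pvSpanL u) a x hu.1 (fun j hjl => hu.2 j hjl x)]
    rw [ih _ (fun v hv => h v (List.mem_cons_of_mem _ hv))]
    rfl

theorem pvFold_id (ts : List (List Char)) (s : List Char)
    (h : ∀ u ∈ ts, u ≠ [] ∧ ∀ j < s.length, ¬ u <+: s.drop j) :
    pvFold ts s = s := by
  induction ts with
  | nil => rfl
  | cons u ts' ih =>
    have hu := h u (by simp)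
    show pvFold ts' (pvRepC u (pvSpanL u) s) = s
    rw [pvRepC_id u (pvSpanL u) s hu.1 hu.2]
    exact ih (fun v hv => h v (List.mem_cons_of_mem _ hv))

theorem pvScanGo_fuel (ts : List (List Char)) (hts : ∀ t ∈ ts, t ≠ []) :
    ∀ (fuel : Nat) (l : List Char), l.length ≤ fuel →
      pvScanGo ts fuel l = pvScanGo ts l.length l := by
  intro fuel
  induction fuel using Nat.strong_induction_on with
  | _ fuel ih =>
    intro l hl
    cases l with
    | nil => cases fuel <;> rfl
    | cons c rest =>
      cases fuel with
      | zero => simp at hl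
      | succ f =>
        have hr : rest.length ≤ f := by simpa using Nat.succ_le_succ_iff.mp hl
        have h2 : ∀ m, pvScanGo ts (m + 1) (c :: rest)
            = if c = '\n' then "<br>\n".toList ++ pvScanGo ts m rest
              else if c = '\r' then "<br>".toList ++ pvScanGo ts m rest
              else match ts.find? (fun t => t.isPrefixOf (c :: rest)) with
                | some t =>
                    ("<span style=\"font-weight: bold; color: red;\">".toList ++ t ++ "</span>".toList)
                      ++ pvScanGo ts m ((c :: rest).drop t.length)
                | none => c :: pvScanGo ts m rest := fun m => rfl
        show pvScanGo ts (f + 1) (c :: rest) = pvScanGo ts (rest.length + 1) (c :: rest)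
        rw [h2 f, h2 rest.length]
        by_cases hc1 : c = '\n'
        · rw [if_pos hc1, if_pos hc1, ih f (by omega) _ hr]
        rw [if_neg hc1, if_neg hc1]
        by_cases hc2 : c = '\r'
        · rw [if_pos hc2, if_pos hc2, ih f (by omega) _ hr]
        rw [if_neg hc2, if_neg hc2]
        cases hfind : ts.find? (fun t => t.isPrefixOf (c :: rest)) with
        | none =>
          dsimp only
          rw [ih f (by omega) _ hr]
        | some t =>
          have ht : t ≠ [] := hts t (List.mem_of_find?_eq_some hfind)
          have htl : 1 ≤ t.length := by
            cases t with
            | nil => exact absurd rfl ht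
            | cons a b => simp
          have hd : ((c :: rest).drop t.length).length ≤ rest.length := by
            simp only [List.length_drop, List.length_cons]
            omega
          dsimp only
          rw [ih f (by omega) _ (le_trans hd hr), ih rest.length (by omega) _ hd]

theorem pvScan_nl (t : List Char) : pvScanL ('\n' :: t) = pvBrn ++ pvScanL t := by
  rfl

theorem pvScan_cr (t : List Char) : pvScanL ('\r' :: t) = pvBr ++ pvScanL t := by
  show pvScanGo pvVL (t.length + 1) ('\r' :: t) = _
  have h2 : pvScanGo pvVL (t.length + 1) ('\r' :: t)
      = if ('\r' : Char) = '\n' then "<br>\n".toList ++ pvScanGo pvVL t.length t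
        else if ('\r' : Char) = '\r' then "<br>".toList ++ pvScanGo pvVL t.length t
        else match pvVL.find? (fun u => u.isPrefixOf ('\r' :: t)) with
          | some u =>
              ("<span style=\"font-weight: bold; color: red;\">".toList ++ u ++ "</span>".toList)
                ++ pvScanGo pvVL t.length (('\r' :: t).drop u.length)
          | none => '\r' :: pvScanGo pvVL t.length t := rfl
  rw [h2, if_neg (by decide), if_pos rfl]
  rfl

theorem pvScan_tok (c : Char) (rest u : List Char) (hc1 : c ≠ '\n') (hc2 : c ≠ '\r')
    (hf : pvVL.find? (fun t => t.isPrefixOf (c :: rest)) = some u) :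
    pvScanL (c :: rest) = pvSpanL u ++ pvScanL ((c :: rest).drop u.length) := by
  show pvScanGo pvVL (rest.length + 1) (c :: rest) = _
  have h2 : pvScanGo pvVL (rest.length + 1) (c :: rest)
      = if c = '\n' then "<br>\n".toList ++ pvScanGo pvVL rest.length rest
        else if c = '\r' then "<br>".toList ++ pvScanGo pvVL rest.length rest
        else match pvVL.find? (fun t => t.isPrefixOf (c :: rest)) with
          | some t =>
              ("<span style=\"font-weight: bold; color: red;\">".toList ++ t ++ "</span>".toList)
                ++ pvScanGo pvVL rest.length ((c :: rest).drop t.length)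
          | none => c :: pvScanGo pvVL rest.length rest := rfl
  rw [h2, if_neg hc1, if_neg hc2, hf]
  dsimp only
  have hu : u ≠ [] := pvF1 u (List.mem_of_find?_eq_some hf)
  have hul : 1 ≤ u.length := by
    cases u with
    | nil => exact absurd rfl hu
    | cons a b => simp
  have hd : ((c :: rest).drop u.length).length ≤ rest.length := by
    simp only [List.length_drop, List.length_cons]
    omega
  rw [pvScanGo_fuel pvVL pvF1 _ _ hd]
  rfl

theorem pvScan_plain (c : Char) (rest : List Char) (hc1 : c ≠ '\n') (hc2 : c ≠ '\r')
    (hf : pvVL.find? (fun t => t.isPrefixOf (c :: rest)) = none) :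
    pvScanL (c :: rest) = c :: pvScanL rest := by
  show pvScanGo pvVL (rest.length + 1) (c :: rest) = _
  have h2 : pvScanGo pvVL (rest.length + 1) (c :: rest)
      = if c = '\n' then "<br>\n".toList ++ pvScanGo pvVL rest.length rest
        else if c = '\r' then "<br>".toList ++ pvScanGo pvVL rest.length rest
        else match pvVL.find? (fun t => t.isPrefixOf (c :: rest)) with
          | some t =>
              ("<span style=\"font-weight: bold; color: red;\">".toList ++ t ++ "</span>".toList)
                ++ pvScanGo pvVL rest.length ((c :: rest).drop t.length)
          | none => c :: pvScanGo pvVL rest.length rest := rfl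
  rw [h2, if_neg hc1, if_neg hc2, hf]
  dsimp only
  rfl

theorem pvScan_skip (a x : List Char)
    (hj : ∀ j < a.length, ∀ p ∈ pvPats, ¬ p <+: (a.drop j ++ x)) :
    pvScanL (a ++ x) = a ++ pvScanL x := by
  induction a with
  | nil => simp
  | cons c a' ih =>
    have h0 := hj 0 (by simp)
    simp only [List.drop_zero] at h0
    have hc1 : c ≠ '\n' := by
      intro hc
      exact h0 ['\n'] (by simp [pvPats]) (by subst hc; exact ⟨a' ++ x, rfl⟩)
    have hc2 : c ≠ '\r' := by
      intro hc
      exact h0 ['\r'] (by simp [pvPats]) (by subst hc; exact ⟨a' ++ x, rfl⟩)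
    have hf : pvVL.find? (fun t => t.isPrefixOf (c :: (a' ++ x))) = none := by
      rw [List.find?_eq_none]
      intro t ht
      simp only [List.isPrefixOf_iff_prefix]
      exact h0 t (by simp [pvPats, ht])
    rw [List.cons_append, pvScan_plain c (a' ++ x) hc1 hc2 hf]
    rw [ih (fun j hjl => by simpa using hj (j + 1) (by simpa using Nat.succ_lt_succ hjl))]
    rfl

theorem pvAll_drop {u z : List Char} (hu : u ≠ [])
    (h : ∀ j ≤ z.length, ¬ u <+: z.drop j) : ∀ j, ¬ u <+: z.drop j := by
  intro j
  by_cases hjl : j ≤ z.length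
  · exact h j hjl
  · rw [List.drop_eq_nil_of_le (by omega)]
    intro hpre
    exact hu (List.prefix_nil.mp hpre)

-- event: some pattern (newline, CR or a token variant) matches at position j
def pvEvAt (s : List Char) (j : Nat) : Prop := ∃ p ∈ pvPats, p <+: s.drop j

-- discharger: no pattern can match inside the event-free prefix `a` when the
-- continuation starts with a character that does not occur in the pattern
theorem pvNoMatch_over_a {u a d z : List Char} (hu : u ∈ pvPats) (_hne : u ≠ [])
    (Ha : ∀ j < a.length, ∀ p ∈ pvPats, ¬ p <+: (a.drop j ++ d))
    (hz : ∀ c, z.head? = some c → c ∉ u) :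
    ∀ j < a.length, ¬ u <+: (a.drop j ++ z) := by
  intro j hj hcon
  rcases pvPfx_cases u (a.drop j) z hcon with h1 | ⟨h2, h3⟩
  · exact Ha j hj u hu (h1.trans (List.prefix_append _ d))
  · by_cases hw : u.drop (a.drop j).length = []
    · have hlen : u.length ≤ (a.drop j).length := by
        have := congrArg List.length hw
        simp only [List.length_drop, List.length_nil] at this ⊢
        omega
      have heq : a.drop j = u := h2.eq_of_length_le hlen
      exact Ha j hj u hu (by rw [heq]; exact List.prefix_append _ d)
    · have hh := pvPrefix_head? h3 hw
      cases hwc : u.drop (a.drop j).length with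
      | nil => exact hw hwc
      | cons w0 wr =>
        have hc0 : z.head? = some w0 := by rw [hh, hwc]; rfl
        have hmem : w0 ∈ u := List.drop_subset _ u (by rw [hwc]; simp)
        exact hz w0 hc0 hmem

-- discharger for the token case: continuation starts with the matched token u_k
theorem pvNoMatch_over_a_tok {u a d uk y : List Char} (hu : u ∈ pvPats)
    (Ha : ∀ j < a.length, ∀ p ∈ pvPats, ¬ p <+: (a.drop j ++ d))
    (hukd : uk <+: d)
    (hocc : ∀ i, 1 ≤ i → ¬ uk <+: u.drop i) :
    ∀ j < a.length, ¬ u <+: (a.drop j ++ (uk ++ y)) := by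
  intro j hj hcon
  rw [← List.append_assoc] at hcon
  rcases pvPfx_cases u (a.drop j ++ uk) y hcon with h1 | ⟨h2, _⟩
  · obtain ⟨r, hr⟩ := hukd
    have hext : a.drop j ++ uk <+: a.drop j ++ d := by
      rw [← hr]
      exact ⟨r, by simp⟩
    exact Ha j hj u hu (h1.trans hext)
  · obtain ⟨r, hr⟩ := h2
    have hdrop : u.drop (a.drop j).length = uk ++ r := by
      rw [← hr, List.append_assoc, List.drop_left]
    have hlen : 1 ≤ (a.drop j).length := by
      simp only [List.length_drop]
      omega
    exact hocc (a.drop j).length hlen (by rw [hdrop]; exact ⟨r, rfl⟩)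

theorem pvNotin_single {c : Char} {u : List Char} (hn : c ∉ u) : ¬ [c] <+: u := by
  intro hp
  exact hn (hp.subset (by simp))

theorem pvSkipCond {u : List Char} (a q : List Char)
    (h1 : ∀ y : List Char, ∀ j < a.length, ¬ u <+: (a.drop j ++ (q ++ y)))
    (h2 : ∀ j' < q.length, ∀ y : List Char, ¬ u <+: (q.drop j' ++ y)) :
    ∀ j < (a ++ q).length, ∀ y : List Char, ¬ u <+: ((a ++ q).drop j ++ y) := by
  intro j hj y
  by_cases hja : j < a.length
  · rw [List.drop_append_of_le_length (le_of_lt hja), List.append_assoc]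
    exact h1 y j hja
  · rw [List.drop_append, List.drop_eq_nil_of_le (by omega), List.nil_append]
    refine h2 (j - a.length) ?_ y
    simp only [List.length_append] at hj
    omega

theorem pvHeadBlock {u : List Char} (q : List Char) (hne : u ≠ [])
    (hq : ∀ c ∈ q, ¬ [c] <+: u) :
    ∀ j' < q.length, ∀ y : List Char, ¬ u <+: (q.drop j' ++ y) := by
  intro j' hj y hcon
  have hqne : q.drop j' ≠ [] := by
    intro h0
    have := congrArg List.length h0
    simp only [List.length_drop, List.length_nil] at this
    omega
  have hh := pvPrefix_head? hcon hne
  rw [List.head?_append_of_ne_nil _ hqne] at hh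
  cases hqd : (q.drop j').head? with
  | none => rw [hqd] at hh; cases u with
    | nil => exact hne rfl
    | cons v u' => simp at hh
  | some c0 =>
    have hc0q : c0 ∈ q := List.drop_subset _ q (List.mem_of_mem_head? (by rw [hqd]; rfl))
    rw [hqd] at hh
    exact hq c0 hc0q (pvSingle_pre.mpr hh.symm)

theorem pvSpanBlock {u v : List Char} (hu : u ∈ pvVL) (hv : v ∈ pvVL) (huv : u ≠ v) :
    ∀ j' < (pvSpanL v).length, ∀ y : List Char, ¬ u <+: ((pvSpanL v).drop j' ++ y) := by
  intro j' hj y hcon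
  rcases pvPfx_cases u _ y hcon with h1 | ⟨h2, _⟩
  · exact pvF7 u hu v hv huv j' (le_of_lt hj) h1
  · have hgt : '>' ∈ (pvSpanL v).drop j' := pvF8 v hv j' hj
    exact ((pvF2 u hu).2.1) (h2.subset hgt)

theorem pvTokRegionBlock {u uk : List Char} (hu : u ∈ pvVL) (huk : uk ∈ pvVL) (hne : u ≠ uk)
    (hcross : ∀ j', 1 ≤ j' → j' < uk.length → ¬ uk.drop j' <+: u) :
    ∀ j' < uk.length, ∀ y : List Char, ¬ u <+: (uk.drop j' ++ y) := by
  intro j' hj y hcon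
  rcases pvPfx_cases u _ y hcon with h1 | ⟨h2, _⟩
  · exact pvF4 u hu uk huk hne j' (le_of_lt hj) h1
  · by_cases hj0 : j' = 0
    · subst hj0
      simp only [List.drop_zero] at h2
      exact pvF4 uk huk u hu (fun he => hne he.symm) 0 (by simp) (by simpa using h2)
    · exact hcross j' (by omega) hj h2

theorem pvSingle_over_a {c0 : Char} {a d : List Char} (hc : [c0] ∈ pvPats)
    (Ha : ∀ j < a.length, ∀ p ∈ pvPats, ¬ p <+: (a.drop j ++ d)) (z : List Char) :
    ∀ j < a.length, ¬ [c0] <+: (a.drop j ++ z) := by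
  intro j hj hpre
  have hdne : a.drop j ≠ [] := by
    intro h0
    have := congrArg List.length h0
    simp only [List.length_drop, List.length_nil] at this
    omega
  have hh := pvSingle_pre.mp hpre
  rw [List.head?_append_of_ne_nil _ hdne] at hh
  refine Ha j hj [c0] hc (pvSingle_pre.mpr ?_)
  rw [List.head?_append_of_ne_nil _ hdne]
  exact hh

theorem pvSingle_region {c0 : Char} {q : List Char} (hc : c0 ∉ q) (z : List Char) :
    ∀ j < q.length, ¬ [c0] <+: (q.drop j ++ z) := by
  intro j hj hpre
  have hdne : q.drop j ≠ [] := by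
    intro h0
    have := congrArg List.length h0
    simp only [List.length_drop, List.length_nil] at this
    omega
  have hh := pvSingle_pre.mp hpre
  rw [List.head?_append_of_ne_nil _ hdne] at hh
  exact hc (List.drop_subset _ q (List.mem_of_mem_head? (by rw [hh]; rfl)))

theorem pvMain : ∀ (n : Nat) (s : List Char), s.length ≤ n → pvChainL s = pvScanL s := by
  intro n
  induction n with
  | zero =>
    intro s hs
    have h0 : s = [] := List.length_eq_zero_iff.mp (Nat.le_zero.mp hs)
    subst h0
    rfl
  | succ n ih =>
    intro s hs
    haveI : DecidablePred (fun j => j < s.length ∧ pvEvAt s j) :=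
      fun _ => Classical.propDecidable _
    by_cases hev : ∃ j, j < s.length ∧ pvEvAt s j
    · -- an event exists; split at the first one
      have hm := Nat.find_spec hev
      set m := Nat.find hev with hmdef
      have hmin : ∀ j < m, ¬ (j < s.length ∧ pvEvAt s j) := fun j hj => Nat.find_min hev hj
      set a := s.take m with hadef
      set d := s.drop m with hddef
      have hs_split : a ++ d = s := List.take_append_drop m s
      have hmlen : m < s.length := hm.1
      have halen : a.length = m := by
        rw [hadef, List.length_take]
        omega
      have Ha : ∀ j < a.length, ∀ p ∈ pvPats, ¬ p <+: (a.drop j ++ d) := by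
        intro j hj p hp hpre
        rw [halen] at hj
        have hdj : s.drop j = a.drop j ++ d := by
          conv_lhs => rw [← hs_split]
          rw [List.drop_append_of_le_length (by rw [halen]; omega)]
        exact hmin j hj ⟨by omega, ⟨p, hp, by rw [hdj]; exact hpre⟩⟩
      have hscan_a : pvScanL s = a ++ pvScanL d := by
        conv_lhs => rw [← hs_split]
        refine pvScan_skip a d ?_
        intro j hj p hp
        exact Ha j hj p hp
      have hEvd : ∃ p ∈ pvPats, p <+: d := hm.2
      have hd_ne : d ≠ [] := by
        intro h0
        have := congrArg List.length h0
        rw [hddef] at this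
        simp only [List.length_drop, List.length_nil] at this
        omega
      obtain ⟨c, d', hd⟩ := List.exists_cons_of_ne_nil hd_ne
      have hslen : s.length = m + d.length := by
        rw [← hs_split, List.length_append, halen]
      clear_value m a d
      clear hmdef hadef hddef hm hmin hev
      have hdlen : d.length = d'.length + 1 := by rw [hd]; rfl
      have hbrn_head : pvBrn.head? = some '<' := rfl
      have hbrn_ne : pvBrn ≠ [] := by
        intro h0
        rw [h0] at hbrn_head
        simp at hbrn_head
      by_cases hc1 : c = '\n'
      · -- newline event
        subst hc1
        have hstep1 : pvRepC ['\n'] pvBrn s = (a ++ pvBrn) ++ pvRepC ['\n'] pvBrn d' := by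
          conv_lhs => rw [← hs_split]
          rw [pvRepC_append ['\n'] pvBrn a d (by simp)
              (fun j hj => Ha j hj ['\n'] (by simp [pvPats]))]
          rw [hd, show ('\n' :: d') = ['\n'] ++ d' from rfl,
              pvRepC_head ['\n'] pvBrn d' (by simp), List.append_assoc]
        have hcond : ∀ u ∈ pvVL, u ≠ [] ∧
            ∀ j < (a ++ pvBrn).length, ∀ y : List Char, ¬ u <+: ((a ++ pvBrn).drop j ++ y) := by
          intro u hu
          refine ⟨pvF1 u hu, pvSkipCond a pvBrn (fun y j hj => ?_)
            (fun j' hj' y => pvHeadBlock pvBrn (pvF1 u hu) (fun c0 hc0 => pvF3 u hu c0 hc0) j' hj' y)⟩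
          refine pvNoMatch_over_a (by simp [pvPats, hu]) (pvF1 u hu) Ha ?_ j hj
          intro c0 hc0
          rw [List.head?_append_of_ne_nil _ hbrn_ne, hbrn_head] at hc0
          exact (Option.some.inj hc0) ▸ (pvF2 u hu).1
        have hd'n : d'.length ≤ n := by omega
        calc pvChainL s
            = pvRepC ['\r'] pvBr (pvFold pvVL ((a ++ pvBrn) ++ pvRepC ['\n'] pvBrn d')) := by
              unfold pvChainL
              rw [hstep1]
          _ = pvRepC ['\r'] pvBr ((a ++ pvBrn) ++ pvFold pvVL (pvRepC ['\n'] pvBrn d')) := by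
              rw [pvFold_skip pvVL (a ++ pvBrn) _ hcond]
          _ = (a ++ pvBrn) ++ pvRepC ['\r'] pvBr (pvFold pvVL (pvRepC ['\n'] pvBrn d')) := by
              refine pvRepC_append ['\r'] pvBr (a ++ pvBrn) _ (by simp) ?_
              intro j hj
              exact pvSkipCond a pvBrn
                (fun y j2 hj2 => pvSingle_over_a (by simp [pvPats]) Ha (pvBrn ++ y) j2 hj2)
                (fun j' hj' y => pvSingle_region pvF10 y j' hj') j hj _
          _ = (a ++ pvBrn) ++ pvChainL d' := rfl
          _ = a ++ pvScanL d := by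
              rw [ih d' hd'n, hd, pvScan_nl, List.append_assoc]
          _ = pvScanL s := hscan_a.symm
      by_cases hc2 : c = '\r'
      · -- carriage-return event
        subst hc2
        have hstep1 : pvRepC ['\n'] pvBrn s = (a ++ ['\r']) ++ pvRepC ['\n'] pvBrn d' := by
          conv_lhs => rw [← hs_split]
          rw [pvRepC_append ['\n'] pvBrn a d (by simp)
              (fun j hj => Ha j hj ['\n'] (by simp [pvPats]))]
          rw [hd, pvRepC_cons_nomatch ['\n'] pvBrn '\r' d'
              (by intro hp; have := pvSingle_pre.mp hp; simp at this)]
          simp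
        have hcond : ∀ u ∈ pvVL, u ≠ [] ∧
            ∀ j < (a ++ ['\r']).length, ∀ y : List Char, ¬ u <+: ((a ++ ['\r']).drop j ++ y) := by
          intro u hu
          refine ⟨pvF1 u hu, pvSkipCond a ['\r'] (fun y j hj => ?_)
            (fun j' hj' y => pvHeadBlock ['\r'] (pvF1 u hu)
              (fun c0 hc0 => by
                simp only [List.mem_singleton] at hc0
                subst hc0
                exact pvNotin_single ((pvF2 u hu).2.2.2)) j' hj' y)⟩
          refine pvNoMatch_over_a (by simp [pvPats, hu]) (pvF1 u hu) Ha ?_ j hj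
          intro c0 hc0
          simp only [List.cons_append, List.head?_cons, Option.some.injEq] at hc0
          exact hc0 ▸ (pvF2 u hu).2.2.2
        have hd'n : d'.length ≤ n := by omega
        calc pvChainL s
            = pvRepC ['\r'] pvBr (pvFold pvVL ((a ++ ['\r']) ++ pvRepC ['\n'] pvBrn d')) := by
              unfold pvChainL
              rw [hstep1]
          _ = pvRepC ['\r'] pvBr ((a ++ ['\r']) ++ pvFold pvVL (pvRepC ['\n'] pvBrn d')) := by
              rw [pvFold_skip pvVL (a ++ ['\r']) _ hcond]
          _ = a ++ pvBr ++ pvRepC ['\r'] pvBr (pvFold pvVL (pvRepC ['\n'] pvBrn d')) := by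
              have hcons : ∀ W : List Char, pvRepC ['\r'] pvBr ('\r' :: W)
                  = pvBr ++ pvRepC ['\r'] pvBr W :=
                fun W => pvRepC_head ['\r'] pvBr W (by simp)
              rw [List.append_assoc, List.singleton_append,
                  pvRepC_append ['\r'] pvBr a ('\r' :: pvFold pvVL (pvRepC ['\n'] pvBrn d'))
                    (by simp)
                    (pvSingle_over_a (by simp [pvPats]) Ha
                      ('\r' :: pvFold pvVL (pvRepC ['\n'] pvBrn d'))),
                  hcons _, List.append_assoc]
          _ = a ++ pvBr ++ pvChainL d' := by
              unfold pvChainL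
              rfl
          _ = a ++ pvScanL d := by
              rw [ih d' hd'n, hd, pvScan_cr, List.append_assoc]
          _ = pvScanL s := hscan_a.symm
      · -- token event
        obtain ⟨p0, hp0mem, hp0pre⟩ := hEvd
        have hp0VL : p0 ∈ pvVL := by
          simp only [pvPats, List.mem_cons] at hp0mem
          rcases hp0mem with h1 | h1 | h1
          · exfalso
            rw [h1, hd] at hp0pre
            have := pvSingle_pre.mp hp0pre
            simp only [List.head?_cons, Option.some.injEq] at this
            exact hc1 this
          · exfalso
            rw [h1, hd] at hp0pre
            have := pvSingle_pre.mp hp0pre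
            simp only [List.head?_cons, Option.some.injEq] at this
            exact hc2 this
          · exact h1
        have hsome : (pvVL.find? (fun t => t.isPrefixOf d)).isSome :=
          List.find?_isSome.mpr ⟨p0, hp0VL, List.isPrefixOf_iff_prefix.mpr hp0pre⟩
        obtain ⟨uk, hfind⟩ := Option.isSome_iff_exists.mp hsome
        obtain ⟨hpred, V₁, V₂, hVL, hV₁⟩ := List.find?_eq_some_iff_append.mp hfind
        have hukmem : uk ∈ pvVL := List.mem_of_find?_eq_some hfind
        have hukd : uk <+: d := List.isPrefixOf_iff_prefix.mp hpred
        obtain ⟨rest, hrest⟩ := hukd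
        have huk_ne : uk ≠ [] := pvF1 uk hukmem
        have huk_len : 1 ≤ uk.length := by
          cases uk with
          | nil => exact absurd rfl huk_ne
          | cons x xs => simp
        have hukd' : uk <+: d := ⟨rest, hrest⟩
        -- memberships and distinctness from the split
        have hmem1 : ∀ u ∈ V₁, u ∈ pvVL := by
          intro u hu
          rw [hVL]
          exact List.mem_append_left _ hu
        have hmem2 : ∀ u ∈ V₂, u ∈ pvVL := by
          intro u hu
          rw [hVL]
          exact List.mem_append_right _ (List.mem_cons_of_mem _ hu)
        have hnd := pvF6
        rw [hVL] at hnd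
        have hne1 : ∀ u ∈ V₁, u ≠ uk := by
          intro u hu he
          have hfalse := hV₁ u hu
          rw [he] at hfalse
          rw [hpred] at hfalse
          simp at hfalse
        have hne2 : ∀ u ∈ V₂, u ≠ uk := by
          intro u hu he
          have h2 : (uk :: V₂).Nodup := (List.sublist_append_right V₁ (uk :: V₂)).nodup hnd
          rw [List.nodup_cons] at h2
          exact h2.1 (by rw [← he]; exact hu)
        have hpw := pvF5
        rw [hVL] at hpw
        have hcross : ∀ u ∈ V₁, ∀ j', 1 ≤ j' → j' < uk.length → ¬ uk.drop j' <+: u := by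
          intro u hu
          exact (List.pairwise_append.mp hpw).2.2 u hu uk List.mem_cons_self
        have hocc1 : ∀ u ∈ V₁, ∀ i, 1 ≤ i → ¬ uk <+: u.drop i := by
          intro u hu i _
          exact pvAll_drop huk_ne
            (pvF4 uk hukmem u (hmem1 u hu) (fun he => hne1 u hu he.symm)) i
        have hocc_self : ∀ i, 1 ≤ i → ¬ uk <+: uk.drop i := by
          intro i hi hpre
          have := hpre.length_le
          simp only [List.length_drop] at this
          omega
        -- span head
        have hAhead : ("<span style=\"font-weight: bold; color: red;\">".toList : List Char).head? = some '<' := rfl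
        have hAne : ("<span style=\"font-weight: bold; color: red;\">".toList : List Char) ≠ [] := by
          intro h0
          rw [h0] at hAhead
          simp at hAhead
        have hsp_head : (pvSpanL uk).head? = some '<' := by
          unfold pvSpanL
          rw [List.append_assoc, List.head?_append_of_ne_nil _ hAne]
          exact hAhead
        have hsp_ne : pvSpanL uk ≠ [] := by
          intro h0
          rw [h0] at hsp_head
          simp at hsp_head
        -- fold split
        have hfold_split : ∀ X, pvFold pvVL X
            = pvFold V₂ (pvRepC uk (pvSpanL uk) (pvFold V₁ X)) := by
          intro X
          rw [hVL]
          unfold pvFold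
          rw [List.foldl_append, List.foldl_cons]
        -- chain steps
        have hstep0 : pvRepC ['\n'] pvBrn s = (a ++ uk) ++ pvRepC ['\n'] pvBrn rest := by
          conv_lhs => rw [← hs_split]
          rw [pvRepC_append ['\n'] pvBrn a d (by simp)
              (fun j hj => Ha j hj ['\n'] (by simp [pvPats])), ← hrest,
              pvRepC_append ['\n'] pvBrn uk rest (by simp)
              (fun j hj => pvSingle_region ((pvF2 uk hukmem).2.2.1) rest j hj),
              List.append_assoc]
        have hcond1 : ∀ u ∈ V₁, u ≠ [] ∧
            ∀ j < (a ++ uk).length, ∀ y : List Char, ¬ u <+: ((a ++ uk).drop j ++ y) := by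
          intro u hu
          have humem := hmem1 u hu
          refine ⟨pvF1 u humem, pvSkipCond a uk
            (fun y j hj => pvNoMatch_over_a_tok (by simp [pvPats, humem]) Ha hukd' (hocc1 u hu) j hj)
            (fun j' hj' y => pvTokRegionBlock humem hukmem (hne1 u hu) (hcross u hu) j' hj' y)⟩
        have hcond2 : ∀ u ∈ V₂, u ≠ [] ∧
            ∀ j < (a ++ pvSpanL uk).length, ∀ y : List Char,
              ¬ u <+: ((a ++ pvSpanL uk).drop j ++ y) := by
          intro u hu
          have humem := hmem2 u hu
          refine ⟨pvF1 u humem, pvSkipCond a (pvSpanL uk) (fun y j hj => ?_)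
            (fun j' hj' y => pvSpanBlock humem hukmem (hne2 u hu) j' hj' y)⟩
          refine pvNoMatch_over_a (by simp [pvPats, humem]) (pvF1 u humem) Ha ?_ j hj
          intro c0 hc0
          rw [List.head?_append_of_ne_nil _ hsp_ne, hsp_head] at hc0
          exact (Option.some.inj hc0) ▸ (pvF2 u humem).1
        have hrest_n : rest.length ≤ n := by
          have := congrArg List.length hrest
          simp only [List.length_append] at this
          omega
        -- scan side
        have hfind' : pvVL.find? (fun t => t.isPrefixOf (c :: d')) = some uk := by
          rw [← hd]
          exact hfind
        have hdropuk : (c :: d').drop uk.length = rest := by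
          rw [← hd, ← hrest, List.drop_left]
        have hscan_d : pvScanL d = pvSpanL uk ++ pvScanL rest := by
          rw [hd, pvScan_tok c d' uk hc1 hc2 hfind', hdropuk]
        calc pvChainL s
            = pvRepC ['\r'] pvBr (pvFold V₂ (pvRepC uk (pvSpanL uk)
                (pvFold V₁ ((a ++ uk) ++ pvRepC ['\n'] pvBrn rest)))) := by
              unfold pvChainL
              rw [hstep0, hfold_split]
          _ = pvRepC ['\r'] pvBr (pvFold V₂ (pvRepC uk (pvSpanL uk)
                (a ++ (uk ++ pvFold V₁ (pvRepC ['\n'] pvBrn rest))))) := by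
              rw [pvFold_skip V₁ (a ++ uk) _ hcond1, List.append_assoc]
          _ = pvRepC ['\r'] pvBr (pvFold V₂ ((a ++ pvSpanL uk)
                ++ pvRepC uk (pvSpanL uk) (pvFold V₁ (pvRepC ['\n'] pvBrn rest)))) := by
              rw [pvRepC_append uk (pvSpanL uk) a _ huk_ne
                  (fun j hj => pvNoMatch_over_a_tok (by simp [pvPats, hukmem]) Ha hukd' hocc_self j hj),
                  pvRepC_head uk (pvSpanL uk) _ huk_ne, List.append_assoc]
          _ = pvRepC ['\r'] pvBr ((a ++ pvSpanL uk)
                ++ pvFold V₂ (pvRepC uk (pvSpanL uk) (pvFold V₁ (pvRepC ['\n'] pvBrn rest)))) := by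
              rw [pvFold_skip V₂ (a ++ pvSpanL uk) _ hcond2]
          _ = (a ++ pvSpanL uk) ++ pvRepC ['\r'] pvBr
                (pvFold V₂ (pvRepC uk (pvSpanL uk) (pvFold V₁ (pvRepC ['\n'] pvBrn rest)))) := by
              refine pvRepC_append ['\r'] pvBr (a ++ pvSpanL uk) _ (by simp) ?_
              intro j hj
              exact pvSkipCond a (pvSpanL uk)
                (fun y j2 hj2 => pvSingle_over_a (by simp [pvPats]) Ha (pvSpanL uk ++ y) j2 hj2)
                (fun j' hj' y => pvSingle_region (pvF9 uk hukmem) y j' hj') j hj _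
          _ = (a ++ pvSpanL uk) ++ pvChainL rest := by
              unfold pvChainL
              rw [hfold_split]
          _ = a ++ pvScanL d := by
              rw [ih rest hrest_n, hscan_d, List.append_assoc]
          _ = pvScanL s := hscan_a.symm
    · -- no event: every pass is the identity
      have hno : ∀ j < s.length, ∀ p ∈ pvPats, ¬ p <+: s.drop j := by
        intro j hj p hp hpre
        exact hev ⟨j, hj, ⟨p, hp, hpre⟩⟩
      have hnl : pvRepC ['\n'] pvBrn s = s :=
        pvRepC_id _ _ _ (by simp) (fun j hj => hno j hj ['\n'] (by simp [pvPats]))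
      have hfold : pvFold pvVL s = s :=
        pvFold_id _ _ (fun u hu => ⟨pvF1 u hu, fun j hj => hno j hj u (by simp [pvPats, hu])⟩)
      have hcr : pvRepC ['\r'] pvBr s = s :=
        pvRepC_id _ _ _ (by simp) (fun j hj => hno j hj ['\r'] (by simp [pvPats]))
      have hscan : pvScanL s = s := by
        have h1 : pvScanL (s ++ []) = s ++ pvScanL [] := by
          refine pvScan_skip s [] ?_
          intro j hj p hp
          rw [List.append_nil]
          exact hno j hj p hp
        rw [List.append_nil] at h1
        rw [h1]
        simp [pvScanL, pvScanGo]
      show pvRepC ['\r'] pvBr (pvFold pvVL (pvRepC ['\n'] pvBrn s)) = pvScanL s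
      rw [hnl, hfold, hcr, hscan]

theorem pvA_eq (p : String) :
    augment_html_rendering p = String.ofList (pvChainL p.toList) := by
  have hrepl : ∀ (s old new : String), old.toList ≠ [] →
      PySem.Str.replace s old new = String.ofList (pvRepC old.toList new.toList s.toList) := by
    intro s old new h
    unfold PySem.Str.replace
    rw [pvReplace_eq _ _ _ h]
  have hspan : ∀ t : String, (pvSpanStr t).toList = pvSpanL t.toList := by
    intro t
    simp [pvSpanStr, pvSpanL]
  have hu1 : PySem.Str.upper "warning" = "WARNING" := by decide
  have hu2 : PySem.Str.upper "failure" = "FAILURE" := by decide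
  have hu3 : PySem.Str.upper "error" = "ERROR" := by decide
  have hu4 : PySem.Str.upper "exception" = "EXCEPTION" := by decide
  have hk1 : pvCapitalizeA "warning" = "Warning" := by decide
  have hk2 : pvCapitalizeA "failure" = "Failure" := by decide
  have hk3 : pvCapitalizeA "error" = "Error" := by decide
  have hk4 : pvCapitalizeA "exception" = "Exception" := by decide
  unfold augment_html_rendering
  simp only [List.foldl_cons, List.foldl_nil]
  rw [hu1, hu2, hu3, hu4, hk1, hk2, hk3, hk4]
  rw [hrepl _ "\n" "<br>\n" (by decide)]
  rw [hrepl _ "warning" _ (by decide), String.toList_ofList]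
  rw [hrepl _ "WARNING" _ (by decide), String.toList_ofList]
  rw [hrepl _ "Warning" _ (by decide), String.toList_ofList]
  rw [hrepl _ "failure" _ (by decide), String.toList_ofList]
  rw [hrepl _ "FAILURE" _ (by decide), String.toList_ofList]
  rw [hrepl _ "Failure" _ (by decide), String.toList_ofList]
  rw [hrepl _ "error" _ (by decide), String.toList_ofList]
  rw [hrepl _ "ERROR" _ (by decide), String.toList_ofList]
  rw [hrepl _ "Error" _ (by decide), String.toList_ofList]
  rw [hrepl _ "exception" _ (by decide), String.toList_ofList]
  rw [hrepl _ "EXCEPTION" _ (by decide), String.toList_ofList]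
  rw [hrepl _ "Exception" _ (by decide), String.toList_ofList]
  rw [hrepl _ "\r" "<br>" (by decide), String.toList_ofList]
  simp only [hspan]
  rw [show pvChainL p.toList
      = pvRepC ['\r'] pvBr (pvFold pvVL (pvRepC ['\n'] pvBrn p.toList)) from rfl]
  simp only [pvFold, pvVL, pvBrn, pvBr, List.foldl_cons, List.foldl_nil]
  rw [show ("warning" : String).toList = ['w', 'a', 'r', 'n', 'i', 'n', 'g'] from rfl,
      show ("WARNING" : String).toList = ['W', 'A', 'R', 'N', 'I', 'N', 'G'] from rfl,
      show ("Warning" : String).toList = ['W', 'a', 'r', 'n', 'i', 'n', 'g'] from rfl,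
      show ("failure" : String).toList = ['f', 'a', 'i', 'l', 'u', 'r', 'e'] from rfl,
      show ("FAILURE" : String).toList = ['F', 'A', 'I', 'L', 'U', 'R', 'E'] from rfl,
      show ("Failure" : String).toList = ['F', 'a', 'i', 'l', 'u', 'r', 'e'] from rfl,
      show ("error" : String).toList = ['e', 'r', 'r', 'o', 'r'] from rfl,
      show ("ERROR" : String).toList = ['E', 'R', 'R', 'O', 'R'] from rfl,
      show ("Error" : String).toList = ['E', 'r', 'r', 'o', 'r'] from rfl,
      show ("exception" : String).toList = ['e', 'x', 'c', 'e', 'p', 't', 'i', 'o', 'n'] from rfl,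
      show ("EXCEPTION" : String).toList = ['E', 'X', 'C', 'E', 'P', 'T', 'I', 'O', 'N'] from rfl,
      show ("Exception" : String).toList = ['E', 'x', 'c', 'e', 'p', 't', 'i', 'o', 'n'] from rfl]
  simp only [String.toList_ofList]
  rw [show ("\n" : String).toList = ['\n'] from rfl]

theorem pvB_eq (p : String) :
    augment_html_rendering_alt p = String.ofList (pvScanL p.toList) := by
  have h : pvTokensB.map String.toList = pvVL := by decide
  unfold augment_html_rendering_alt
  rw [h]
  rfl

-- ===== VERDICT (by name: the statement is the Claim_ definition above) =====
theorem augment_html_rendering_spec : Claim_equal_augment_html_rendering := by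
  intro payload _
  unfold Spec_augment_html_rendering
  rw [pvA_eq, pvB_eq, pvMain payload.toList.length payload.toList (le_refl _)]
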